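-- pv_equiv track=rewrite | github.com/BugSwarm/bugswarm | bugswarm/analyzer/utils.py | get_instance_line
-- ===== SOURCE A (Python) =====
-- from typing import List
-- from typing import Optional
--
-- def get_instance_line(worker_lines: List[str]) -> Optional[str]:
--     """
--     :param worker_lines: The lines from a Travis log
--     :return: The line in `worker_lines` that contains information about the worker instance.
--     """
--     if not worker_lines:
--         raise ValueError
--     if any(not isinstance(l, str) for l in worker_lines):
--         raise TypeError
--
--     instance_lines = [line for line in worker_lines if 'instance' in line]
--     if not instance_lines:
--         return None
--     return instance_lines[-1]
-- ===== SOURCE B (Python) =====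
-- from typing import List
-- from typing import Optional
--
-- def get_instance_line(worker_lines: List[str]) -> Optional[str]:
--     if not worker_lines:
--         raise ValueError
--     if any(not isinstance(l, str) for l in worker_lines):
--         raise TypeError
--     for line in reversed(worker_lines):
--         if 'instance' in line:
--             return line
--     return None
-- ===== Notes on version B (the rewrite author's own statement) =====
-- stated objective: alternative
-- what changed: Replaces A's filtering comprehension plus last-element indexing with a backward scan over reversed(worker_lines) that returns the first matching line, building no intermediate list.
import Mathlib
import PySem

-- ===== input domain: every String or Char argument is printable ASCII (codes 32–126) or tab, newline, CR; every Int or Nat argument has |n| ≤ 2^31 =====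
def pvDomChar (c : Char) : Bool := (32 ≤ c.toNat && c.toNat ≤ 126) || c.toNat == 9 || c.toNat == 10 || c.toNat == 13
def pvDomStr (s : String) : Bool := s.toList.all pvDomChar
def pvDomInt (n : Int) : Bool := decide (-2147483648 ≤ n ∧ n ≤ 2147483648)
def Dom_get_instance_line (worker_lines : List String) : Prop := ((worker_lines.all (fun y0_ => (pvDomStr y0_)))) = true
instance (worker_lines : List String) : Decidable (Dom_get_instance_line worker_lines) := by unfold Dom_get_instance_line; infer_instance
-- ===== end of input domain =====

-- B replaces A's filter-then-index-last with a single backward scan (first match in reverse); return values agree on all nonempty lists.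
-- ===== PORT A =====
def get_instance_line (worker_lines : List String) : Option String :=
  let instance_lines := worker_lines.filter (fun line => PySem.Str.isIn "instance" line)
  if instance_lines = [] then none
  else PySem.List.pyGet? instance_lines (-1)   -- instance_lines[-1]; nonempty here, so this is some _

-- ===== PORT B =====
def revScan : List String → Option String
  | [] => none
  | line :: rest => if PySem.Str.isIn "instance" line then some line else revScan rest

def get_instance_line_alt (worker_lines : List String) : Option String :=
  revScan worker_lines.reverse

-- ===== PRECONDITION & SPEC =====
-- A raises ValueError on the empty list (B raises the same), so Pre_ excludes it.
def Pre_get_instance_line (worker_lines : List String) : Prop := worker_lines ≠ []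
instance (worker_lines : List String) : Decidable (Pre_get_instance_line worker_lines) := by unfold Pre_get_instance_line; infer_instance
def pvWitness_get_instance_line : List String := ["vm instance i-123", "other"]
def Spec_get_instance_line (worker_lines : List String) (out : Option String) : Prop := out = get_instance_line_alt worker_lines
instance (worker_lines : List String) (out : Option String) : Decidable (Spec_get_instance_line worker_lines out) := by unfold Spec_get_instance_line; infer_instance

-- ===== CLAIM (what is proved, stated in full; the proofs are below) =====
def Claim_equal_get_instance_line : Prop := ∀ (worker_lines : List String), Dom_get_instance_line worker_lines → Pre_get_instance_line worker_lines → Spec_get_instance_line worker_lines (get_instance_line worker_lines)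

-- ===== LEMMAS AND PROOFS =====

-- ===== VERDICT (by name: the statement is the Claim_ definition above) =====
theorem revScan_eq_find? (l : List String) :
    revScan l = l.find? (fun line => PySem.Str.isIn "instance" line) := by
  induction l with
  | nil => rfl
  | cons a t ih =>
    simp only [revScan, List.find?]
    split <;> simp_all

theorem pyGet_neg_one_eq_getLast? (xs : List String) (h : xs ≠ []) :
    PySem.List.pyGet? xs (-1) = xs.getLast? := by
  have hlen : 0 < xs.length := List.length_pos_iff.mpr h
  rw [show (-1 : Int) = -((1 : Nat) : Int) by simp]
  rw [PySem.List.pyGet?_neg_natCast xs 1 (by omega) (by omega)]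
  rw [List.getLast?_eq_getElem?]

theorem get_instance_line_spec : Claim_equal_get_instance_line := by
  intro ws _ hpre
  unfold Spec_get_instance_line get_instance_line get_instance_line_alt
  rw [revScan_eq_find?]
  simp only []
  set p := fun line => PySem.Str.isIn "instance" line with hp
  rw [← List.head?_filter, List.filter_reverse, List.head?_reverse]
  split
  · next h => rw [h]; rfl
  · next h => exact pyGet_neg_one_eq_getLast? _ h
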